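-- pv_equiv track=rewrite | github.com/Coheninon/Python-projects | project-4.py | diff_sparse_matrices
-- ===== SOURCE A (Python) =====
-- def diff_sparse_matrices(lst):
--     d = {}
--     for key in lst[0]:
--         d[key] = lst[0].get(key,0)
--
--     j = 1
--     while j < len(lst):
--         for key in lst[j]:
--             if not key in d:
--                 d[key] = -lst[j].get(key,0)
--             else:
--                 d[key] = d[key]-lst[j].get(key,0)
--         j += 1
--     result = {}
--     result = d.copy()
--     for key in result.keys():
--         if d[key] == 0:
--             d.pop (key, 0)
--
--     return d
-- ===== SOURCE B (Python) =====
-- def diff_sparse_matrices(lst):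
--     first, rest = lst[0], lst[1:]
--     # key-outer traversal: collect keys in first-occurrence order, then compute each
--     # key's value in one shot and keep only nonzero results
--     seen = set()
--     order = []
--     for m in lst:
--         for k in m:
--             if k not in seen:
--                 seen.add(k)
--                 order.append(k)
--     res = {}
--     for k in order:
--         v = first.get(k, 0) - sum(m.get(k, 0) for m in rest)
--         if v != 0:
--             res[k] = v
--     return res
-- ===== Notes on version B (the rewrite author's own statement) =====
-- stated objective: simpler
-- what changed: A accumulates per matrix into a running dict and then does a separate copy-and-pop pass to delete zeros; B traverses key-outer: it collects the keys in first-occurrence order, computes each key's value directly as first.get(k,0) minus the sum over the remaining matrices, and builds the result in a single loop that only inserts nonzero values, so the cleanup pass disappears.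
import Mathlib
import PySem

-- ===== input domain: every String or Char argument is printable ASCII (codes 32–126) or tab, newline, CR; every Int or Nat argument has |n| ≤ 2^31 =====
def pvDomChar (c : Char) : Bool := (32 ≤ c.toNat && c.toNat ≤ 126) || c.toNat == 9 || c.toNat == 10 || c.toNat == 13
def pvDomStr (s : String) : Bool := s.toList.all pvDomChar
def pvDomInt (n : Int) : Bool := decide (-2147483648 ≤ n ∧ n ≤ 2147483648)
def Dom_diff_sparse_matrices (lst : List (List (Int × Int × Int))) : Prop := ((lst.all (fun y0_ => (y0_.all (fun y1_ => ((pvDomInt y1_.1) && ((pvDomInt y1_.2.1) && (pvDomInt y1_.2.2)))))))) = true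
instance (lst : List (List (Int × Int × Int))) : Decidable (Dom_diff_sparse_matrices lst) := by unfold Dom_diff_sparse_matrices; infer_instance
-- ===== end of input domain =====

-- B replaces A's per-matrix accumulation plus copy-and-pop zero-cleanup by a key-outer
-- traversal (keys in first-occurrence order, each value computed as one difference-of-sums,
-- only nonzero values ever inserted); objective: simpler.

-- A matrix parameter has Python type dict[tuple[int,int],int]; its List (Int × Int × Int)
-- value is the association list of that dict: build the PySem.Dict it denotes (insertion
-- order, later duplicates overwrite in place, exactly Python's dict construction).
def pvToDict (m : List (Int × Int × Int)) : PySem.Dict (Int × Int) Int :=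
  PySem.Dict.ofList (m.map (fun t => ((t.1, t.2.1), t.2.2)))

-- ===== PORT A =====
def diff_sparse_matrices (lst : List (List (Int × Int × Int))) : List (Int × Int × Int) :=
  match PySem.List.pyGet? lst 0 with
  | none => []           -- lst[0] raises IndexError: excluded by Pre_
  | some l0 =>
    let m0 := pvToDict l0
    -- for key in lst[0]: d[key] = lst[0].get(key,0)
    let d := m0.items.foldl (fun d kv => d.insert kv.1 (m0.getD kv.1 0)) PySem.Dict.empty
    -- j = 1; while j < len(lst): for key in lst[j]: …
    let d := (PySem.List.pyRange 1 lst.length 1).foldl (fun d j =>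
        let mj := pvToDict (PySem.List.pyGetD lst j [])
        mj.items.foldl (fun d kv =>
          if d.contains kv.1 = false then d.insert kv.1 (-(mj.getD kv.1 0))
          else d.insert kv.1 (d.getD kv.1 0 - mj.getD kv.1 0)) d) d
    -- result = d.copy(); for key in result.keys(): if d[key] == 0: d.pop(key, 0)
    let result := d
    let d := result.keys.foldl (fun d k => if d.getD k 0 = 0 then d.erase k else d) d
    d.items.map (fun kv => (kv.1.1, kv.1.2, kv.2))

-- ===== PORT B =====
def diff_sparse_matrices_alt (lst : List (List (Int × Int × Int))) : List (Int × Int × Int) :=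
  match PySem.List.pyGet? lst 0 with
  | none => []           -- lst[0] raises IndexError: excluded by Pre_
  | some l0 =>
    let first := pvToDict l0
    let rest := (PySem.List.slice lst (some 1) none).map pvToDict
    -- seen = set(); order = []; for m in lst: for k in m: if k not in seen: add
    let order := lst.foldl (fun s m => (pvToDict m).keys.foldl (fun s k => PySem.Set.add s k) s)
                   (PySem.Set.empty)
    -- res = {}; for k in order: v = first.get(k,0) - sum(…); if v != 0: res[k] = v
    let res := order.foldl (fun res k =>
        let v := first.getD k 0 - (rest.map (fun m => m.getD k 0)).sum
        if v ≠ 0 then res.insert k v else res) PySem.Dict.empty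
    res.items.map (fun kv => (kv.1.1, kv.1.2, kv.2))

-- ===== PRECONDITION & SPEC =====
-- Pre_ excludes only the empty list, on which A (and B) raises IndexError at lst[0].
def Pre_diff_sparse_matrices (lst : List (List (Int × Int × Int))) : Prop := lst ≠ []
instance (lst : List (List (Int × Int × Int))) : Decidable (Pre_diff_sparse_matrices lst) := by
  unfold Pre_diff_sparse_matrices; infer_instance

def pvWitness_diff_sparse_matrices : (List (List (Int × Int × Int))) :=
  [[(0, 0, 1), (1, 1, 2)], [(1, 1, 2), (2, 2, 3)]]

def Spec_diff_sparse_matrices (lst : List (List (Int × Int × Int))) (out : List (Int × Int × Int)) : Prop := out = diff_sparse_matrices_alt lst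
instance (lst : List (List (Int × Int × Int))) (out : List (Int × Int × Int)) : Decidable (Spec_diff_sparse_matrices lst out) := by unfold Spec_diff_sparse_matrices; infer_instance

-- ===== CLAIM (what is proved, stated in full; the proofs are below) =====
def Claim_equal_diff_sparse_matrices : Prop := ∀ (lst : List (List (Int × Int × Int))), Dom_diff_sparse_matrices lst → Pre_diff_sparse_matrices lst → Spec_diff_sparse_matrices lst (diff_sparse_matrices lst)

-- ===== LEMMAS AND PROOFS =====

-- abbreviation used only by the proofs: the canonical "subtract matrix x into d" step
def pvStep (d : PySem.Dict (Int × Int) Int) (x : List (Int × Int × Int)) :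
    PySem.Dict (Int × Int) Int :=
  (pvToDict x).items.foldl (fun d kv => d.insert kv.1 (d.getD kv.1 0 - kv.2)) d

-- the subtraction phase, one association list (unique keys) at a time: pointwise effect on getD
theorem pv_sub_phase (ps : List ((Int × Int) × Int)) :
    ∀ (d : PySem.Dict (Int × Int) Int) (k : Int × Int), (ps.map Prod.fst).Nodup →
    (ps.foldl (fun d kv => d.insert kv.1 (d.getD kv.1 0 - kv.2)) d).getD k 0
      = d.getD k 0 - (PySem.Dict.mk ps).getD k 0 := by
  induction ps with
  | nil =>
    intro d k _
    simp [PySem.Dict.getD_eq_get?_getD, PySem.Dict.get?]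
  | cons a t ih =>
    intro d k hnd
    simp only [List.map_cons, List.nodup_cons] at hnd
    obtain ⟨ha, hnt⟩ := hnd
    simp only [List.foldl_cons]
    rw [ih _ k hnt]
    rw [PySem.Dict.getD_eq_get?_getD (PySem.Dict.mk (a :: t)), PySem.Dict.get?_mk_cons]
    by_cases hk : k = a.1
    · subst hk
      have h1 : (PySem.Dict.mk t).get? a.1 = none := by
        rw [PySem.Dict.get?_eq_none_iff_not_mem_keys]
        simpa [PySem.Dict.keys_mk] using ha
      rw [PySem.Dict.getD_eq_get?_getD (PySem.Dict.mk t), h1]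
      simp [PySem.Dict.getD_insert_self]
    · rw [PySem.Dict.getD_insert_of_ne _ _ _ hk]
      have : (a.1 == k) = false := by simp only [beq_eq_false_iff_ne, ne_eq]; exact fun h => hk h.symm
      rw [this]
      simp [PySem.Dict.getD_eq_get?_getD]

-- A's final copy-and-pop pass deletes exactly the listed keys whose value is zero
theorem pv_cleanup (ks : List (Int × Int)) :
    ∀ (d : PySem.Dict (Int × Int) Int), d.keys.Nodup →
    (ks.foldl (fun d k => if d.getD k 0 = 0 then d.erase k else d) d).items
      = d.items.filter (fun kv => !(decide (kv.1 ∈ ks) && decide (kv.2 = 0))) := by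
  induction ks with
  | nil => intro d _; simp
  | cons k t ih =>
    intro d hnd
    simp only [List.foldl_cons]
    by_cases h0 : d.getD k 0 = 0
    · rw [if_pos h0]
      have herase : (d.erase k).items = d.items.filter (fun p => !(p.1 == k)) := rfl
      have hnd' : (d.erase k).keys.Nodup := by
        have : (d.erase k).keys = d.keys.filter (fun x => !(x == k)) := by
          show (d.items.filter (fun p => !(p.1 == k))).map (fun x => x.1)
              = (d.items.map (fun x => x.1)).filter (fun x => !(x == k))
          rw [List.filter_map]; rfl
        rw [this]; exact hnd.filter _
      rw [ih _ hnd', herase, List.filter_filter]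
      apply List.filter_congr
      intro kv hkv
      by_cases hk : kv.1 = k
      · have hv : kv.2 = 0 := by
          have : d.getD kv.1 0 = kv.2 := PySem.Dict.getD_of_mem_items d (by simpa using hkv) hnd 0
          rw [hk] at this; omega
        simp [hk, hv]
      · simp [hk, List.mem_cons]
    · rw [if_neg h0]
      rw [ih _ hnd]
      apply List.filter_congr
      intro kv hkv
      by_cases hk : kv.1 = k
      · have hv : d.getD kv.1 0 = kv.2 := PySem.Dict.getD_of_mem_items d (by simpa using hkv) hnd 0
        have : kv.2 ≠ 0 := by rw [hk] at hv; omega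
        simp [hk, this, List.mem_cons]
      · simp [hk, List.mem_cons]

-- B's build loop over distinct fresh keys appends exactly the nonzero entries
theorem pv_build (v : (Int × Int) → Int) (ks : List (Int × Int)) :
    ∀ (res : PySem.Dict (Int × Int) Int), ks.Nodup → (∀ k ∈ ks, res.contains k = false) →
    (ks.foldl (fun res k => if v k ≠ 0 then res.insert k (v k) else res) res).items
      = res.items ++ (ks.filter (fun k => v k != 0)).map (fun k => (k, v k)) := by
  induction ks with
  | nil => intro res _ _; simp
  | cons k t ih =>
    intro res hnd hfresh
    simp only [List.nodup_cons] at hnd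
    obtain ⟨hkt, hnt⟩ := hnd
    simp only [List.foldl_cons]
    by_cases hv : v k ≠ 0
    · rw [if_pos hv]
      have hins : (res.insert k (v k)).items = res.items ++ [(k, v k)] :=
        PySem.Dict.items_insert_of_not_contains res (v k) (hfresh k (by simp))
      have hfresh' : ∀ k' ∈ t, (res.insert k (v k)).contains k' = false := by
        intro k' hk'
        rw [PySem.Dict.contains_insert]
        have h1 : (k' == k) = false := by
          simp only [beq_eq_false_iff_ne, ne_eq]
          exact fun h => hkt (h ▸ hk')
        rw [h1, hfresh k' (by simp [hk'])]
        rfl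
      rw [ih _ hnt hfresh', hins, List.append_assoc]
      congr 1
      have : v k != 0 := by simpa using hv
      simp [this]
    · rw [if_neg hv]
      have : (v k != 0) = false := by simpa using hv
      rw [ih _ hnt (fun k' hk' => hfresh k' (by simp [hk']))]
      simp [this]

-- a dict with unique keys is the graph of its getD over its keys
theorem pv_items_eq (d : PySem.Dict (Int × Int) Int) (h : d.keys.Nodup) :
    d.items = d.keys.map (fun k => (k, d.getD k 0)) := by
  show d.items = (d.items.map (fun x => x.1)).map (fun k => (k, d.getD k 0))
  rw [List.map_map]
  conv_lhs => rw [← List.map_id d.items]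
  apply List.map_congr_left
  intro kv hkv
  have : d.getD kv.1 0 = kv.2 := PySem.Dict.getD_of_mem_items d (by simpa using hkv) h 0
  simp [Function.comp, this]

-- value of any key after subtracting a list of matrices
theorem pv_val (ls : List (List (Int × Int × Int))) :
    ∀ (d : PySem.Dict (Int × Int) Int) (k : Int × Int),
    (ls.foldl pvStep d).getD k 0
      = d.getD k 0 - (ls.map (fun x => (pvToDict x).getD k 0)).sum := by
  induction ls with
  | nil => intro d k; simp
  | cons x t ih =>
    intro d k
    simp only [List.foldl_cons, List.map_cons, List.sum_cons]
    rw [ih _ k]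
    have h1 : (pvStep d x).getD k 0 = d.getD k 0 - (PySem.Dict.mk (pvToDict x).items).getD k 0 :=
      pv_sub_phase (pvToDict x).items d k (PySem.Dict.nodup_keys_ofList _)
    rw [h1]
    have : (PySem.Dict.mk (pvToDict x).items) = pvToDict x := rfl
    rw [this]
    ring

-- key order after subtracting a list of matrices: first-occurrence set update
theorem pv_keys (ls : List (List (Int × Int × Int))) :
    ∀ (d : PySem.Dict (Int × Int) Int),
    (ls.foldl pvStep d).keys = ls.foldl (fun s x => PySem.Set.update s (pvToDict x).keys) d.keys := by
  induction ls with
  | nil => intro d; rfl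
  | cons x t ih =>
    intro d
    simp only [List.foldl_cons]
    rw [ih]
    congr 1
    exact PySem.Dict.keys_foldl_insert_key (pvToDict x).items (fun kv => kv.1)
      (fun d kv => d.getD kv.1 0 - kv.2) d

theorem pv_nodup (ls : List (List (Int × Int × Int))) :
    ∀ (d : PySem.Dict (Int × Int) Int), d.keys.Nodup → (ls.foldl pvStep d).keys.Nodup := by
  induction ls with
  | nil => intro d h; exact h
  | cons x t ih =>
    intro d h
    simp only [List.foldl_cons]
    exact ih _ (PySem.Dict.nodup_keys_foldl_insert_key (pvToDict x).items (fun kv => kv.1)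
      (fun d kv => d.getD kv.1 0 - kv.2) d h)

-- phase 1 of A builds exactly the first matrix's dict
theorem pv_phase1 (m0 : PySem.Dict (Int × Int) Int) (h : m0.keys.Nodup) :
    m0.items.foldl (fun d kv => d.insert kv.1 (m0.getD kv.1 0)) PySem.Dict.empty = m0 := by
  have hcongr : m0.items.foldl (fun d kv => d.insert kv.1 (m0.getD kv.1 0)) PySem.Dict.empty
      = m0.items.foldl (fun d kv => d.insert kv.1 kv.2) PySem.Dict.empty := by
    apply PySem.List.foldl_congr_mem
    intro acc kv hkv
    rw [PySem.Dict.getD_of_mem_items m0 (by simpa using hkv) h 0]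
  rw [hcongr]
  apply PySem.Dict.ext
  rw [PySem.Dict.items_foldl_insert_fresh m0.items (fun kv => kv.1) (fun kv => kv.2) _
      (fun a _ => PySem.Dict.contains_empty a.1) h]
  simp [PySem.Dict.empty]

-- A on a nonempty list, reduced to the canonical fold
theorem pv_A_char (l0 : List (Int × Int × Int)) (tl : List (List (Int × Int × Int))) :
    diff_sparse_matrices (l0 :: tl)
      = ((tl.foldl pvStep (pvToDict l0)).keys.foldl
            (fun d k => if d.getD k 0 = 0 then d.erase k else d)
            (tl.foldl pvStep (pvToDict l0))).items.map (fun kv => (kv.1.1, kv.1.2, kv.2)) := by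
  have h0 : PySem.List.pyGet? (l0 :: tl) (0 : Int) = some l0 := by
    simp [PySem.List.pyGet?, PySem.List.pyIdx?]
  unfold diff_sparse_matrices
  rw [h0]
  simp only []
  rw [pv_phase1 (pvToDict l0) (PySem.Dict.nodup_keys_ofList _)]
  rw [PySem.List.foldl_pyRange_pyGetD' (l0 :: tl) []
      (fun (d : PySem.Dict (Int × Int) Int) (x : List (Int × Int × Int)) =>
        (pvToDict x).items.foldl (fun d kv =>
          if d.contains kv.1 = false then d.insert kv.1 (-(pvToDict x).getD kv.1 0)
          else d.insert kv.1 (d.getD kv.1 0 - (pvToDict x).getD kv.1 0)) d)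
      (pvToDict l0) (by norm_num : (0:Int) ≤ 1)]
  have hdrop : (List.drop (1:Int).toNat (l0 :: tl)) = tl := rfl
  rw [hdrop]
  have hcong : tl.foldl
      (fun (d : PySem.Dict (Int × Int) Int) (x : List (Int × Int × Int)) =>
        (pvToDict x).items.foldl (fun d kv =>
          if d.contains kv.1 = false then d.insert kv.1 (-(pvToDict x).getD kv.1 0)
          else d.insert kv.1 (d.getD kv.1 0 - (pvToDict x).getD kv.1 0)) d) (pvToDict l0)
    = tl.foldl pvStep (pvToDict l0) := by
    apply PySem.List.foldl_congr_mem
    intro acc x _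
    apply PySem.List.foldl_congr_mem
    intro d kv hkv
    have hv : (pvToDict x).getD kv.1 0 = kv.2 :=
      PySem.Dict.getD_of_mem_items _ (by simpa using hkv) (PySem.Dict.nodup_keys_ofList _) 0
    rw [hv]
    by_cases hc : d.contains kv.1 = false
    · rw [if_pos hc, PySem.Dict.getD_of_not_contains d 0 hc]
      norm_num
    · rw [if_neg hc]
  rw [hcong]

-- B on a nonempty list, reduced to the canonical build over the canonical key order
theorem pv_B_char (l0 : List (Int × Int × Int)) (tl : List (List (Int × Int × Int))) :
    diff_sparse_matrices_alt (l0 :: tl)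
      = ((tl.foldl (fun s x => PySem.Set.update s (pvToDict x).keys) (pvToDict l0).keys).foldl
          (fun res k =>
            if (pvToDict l0).getD k 0 - (tl.map (fun x => (pvToDict x).getD k 0)).sum ≠ 0
            then res.insert k ((pvToDict l0).getD k 0 - (tl.map (fun x => (pvToDict x).getD k 0)).sum)
            else res) PySem.Dict.empty).items.map (fun kv => (kv.1.1, kv.1.2, kv.2)) := by
  have h0 : PySem.List.pyGet? (l0 :: tl) (0 : Int) = some l0 := by
    simp [PySem.List.pyGet?, PySem.List.pyIdx?]
  unfold diff_sparse_matrices_alt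
  rw [h0]
  simp only []
  rw [PySem.List.slice_from (l0 :: tl) (by norm_num : (0:Int) ≤ 1)]
  have hdrop : (List.drop (1:Int).toNat (l0 :: tl)) = tl := rfl
  rw [hdrop]
  have horder : (l0 :: tl).foldl
      (fun s m => (pvToDict m).keys.foldl (fun s k => PySem.Set.add s k) s) PySem.Set.empty
      = tl.foldl (fun s x => PySem.Set.update s (pvToDict x).keys) (pvToDict l0).keys := by
    simp only [List.foldl_cons]
    have h1 : (pvToDict l0).keys.foldl (fun s k => PySem.Set.add s k) PySem.Set.empty
        = (pvToDict l0).keys := by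
      show PySem.Set.update PySem.Set.empty (pvToDict l0).keys = (pvToDict l0).keys
      rw [show (PySem.Set.empty : PySem.Set (Int × Int)) = [] from rfl]
      rw [PySem.Set.update_nil_left]
      exact PySem.Set.ofList_eq_self_of_nodup (pvToDict l0).keys (PySem.Dict.nodup_keys_ofList _)
    rw [h1]
    rfl
  rw [horder]
  simp only [List.map_map]
  rfl

-- ===== VERDICT (by name: the statement is the Claim_ definition above) =====
theorem diff_sparse_matrices_spec : Claim_equal_diff_sparse_matrices := by
  unfold Claim_equal_diff_sparse_matrices
  intro lst _ hpre
  unfold Spec_diff_sparse_matrices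
  match lst with
  | [] => exact absurd rfl hpre
  | l0 :: tl =>
    rw [pv_A_char, pv_B_char]
    have hnd0 : (pvToDict l0).keys.Nodup := PySem.Dict.nodup_keys_ofList _
    have hnd1 : (tl.foldl pvStep (pvToDict l0)).keys.Nodup := pv_nodup tl _ hnd0
    set d1 := tl.foldl pvStep (pvToDict l0) with hd1
    set v : (Int × Int) → Int :=
      fun k => (pvToDict l0).getD k 0 - (tl.map (fun x => (pvToDict x).getD k 0)).sum with hvdef
    have hval : ∀ k, d1.getD k 0 = v k := by
      intro k
      rw [hd1, pv_val tl (pvToDict l0) k]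
    have hkeys : d1.keys = tl.foldl (fun s x => PySem.Set.update s (pvToDict x).keys) (pvToDict l0).keys := by
      rw [hd1, pv_keys]
    -- A side: cleanup = keep nonzero entries
    rw [pv_cleanup d1.keys d1 hnd1]
    have hA : d1.items.filter (fun kv => !(decide (kv.1 ∈ d1.keys) && decide (kv.2 = 0)))
        = d1.items.filter (fun kv => kv.2 != 0) := by
      apply List.filter_congr
      intro kv hkv
      have : kv.1 ∈ d1.keys := PySem.Dict.mem_keys_of_mem_items d1 hkv
      simp only [this, decide_true, Bool.true_and, bne]
      rfl
    rw [hA]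
    -- B side: build = nonzero graph over the same key list
    rw [← hkeys]
    have hB : (d1.keys.foldl (fun res k => if v k ≠ 0 then res.insert k (v k) else res)
        PySem.Dict.empty).items
        = (d1.keys.filter (fun k => v k != 0)).map (fun k => (k, v k)) := by
      rw [pv_build v d1.keys PySem.Dict.empty hnd1 (fun k _ => PySem.Dict.contains_empty k)]
      simp [PySem.Dict.empty]
    rw [hB]
    -- identify the two item lists
    rw [pv_items_eq d1 hnd1]
    rw [List.filter_map]
    have hfun : (fun k => ((k : Int × Int), d1.getD k 0)) = fun k => (k, v k) :=
      funext fun k => by rw [hval k]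
    rw [hfun]
    congr 1
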